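-- pv_equiv track=rewrite | github.com/google/proto-quic | src/tools/binary_size/function_signature.py | _FindParameterListParen
-- ===== SOURCE A (Python) =====
-- def _FindParameterListParen(name):
--   """Finds index of the "(" that denotes the start of a paremeter list."""
--   # This loops from left-to-right, but the only reason (I think) that this
--   # is necessary (rather than reusing _FindLastCharOutsideOfBrackets), is
--   # to capture the outer-most function in the case where classes are nested.
--   start_idx = 0
--   while True:
--     template_balance_count = 0
--     paren_balance_count = 0
--     while True:
--       idx = name.find('(', start_idx)
--       if idx == -1:
--         return -1
--       template_balance_count += (
--           name.count('<', start_idx, idx) - name.count('>', start_idx, idx))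
--       # Special: operators with angle brackets.
--       operator_idx = name.find('operator<', start_idx, idx)
--       if operator_idx != -1:
--         if name[operator_idx + 9] == '<':
--           template_balance_count -= 2
--         else:
--           template_balance_count -= 1
--       else:
--         operator_idx = name.find('operator>', start_idx, idx)
--         if operator_idx != -1:
--           if name[operator_idx + 9] == '>':
--             template_balance_count += 2
--           else:
--             template_balance_count += 1
--
--       paren_balance_count += (
--           name.count('(', start_idx, idx) - name.count(')', start_idx, idx))
--       if template_balance_count == 0 and paren_balance_count == 0:
--         # Special case: skip "(anonymous namespace)".
--         if -1 != name.find('(anonymous namespace)', idx, idx + 21):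
--           start_idx = idx + 21
--           continue
--         # Special case: skip "decltype (...)"
--         if name[idx - 1] != ' ':
--           return idx
--       start_idx = idx + 1
--       paren_balance_count += 1
-- ===== SOURCE B (Python) =====
-- def _FindParameterListParen(name):
--   """Finds index of the "(" that denotes the start of a parameter list.
--
--   Single left-to-right character scan maintaining running template and paren
--   balance counts, instead of repeated find()/count() passes over segments.
--   """
--   n = len(name)
--   template_balance = 0
--   paren_balance = 0
--   lt_corr = None  # correction for first 'operator<' of the current segment
--   gt_corr = None  # correction for first 'operator>' of the current segment
--   i = 0
--   while i < n:
--     c = name[i]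
--     if c == '(':
--       # Apply the operator-token correction ('operator<' takes priority).
--       if lt_corr is not None:
--         template_balance += lt_corr
--       elif gt_corr is not None:
--         template_balance += gt_corr
--       lt_corr = None
--       gt_corr = None
--       if template_balance == 0 and paren_balance == 0:
--         if name[i:i + 21] == '(anonymous namespace)':
--           i += 21
--           continue
--         if name[i - 1] != ' ':
--           return i
--       paren_balance += 1
--       i += 1
--       continue
--     if c == '<':
--       template_balance += 1
--     elif c == '>':
--       template_balance -= 1
--     elif c == ')':
--       paren_balance -= 1
--     if lt_corr is None and name[i:i + 9] == 'operator<':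
--       lt_corr = -2 if name[i + 9:i + 10] == '<' else -1
--     if gt_corr is None and name[i:i + 9] == 'operator>':
--       gt_corr = 2 if name[i + 9:i + 10] == '>' else 1
--     i += 1
--   return -1
-- ===== Notes on version B (the rewrite author's own statement) =====
-- stated objective: alternative
-- what changed: A repeatedly calls name.find/name.count over inter-paren segments in a restarting while-loop; B makes a single left-to-right character scan that maintains running template/paren balance counters and per-segment first-'operator<'/'operator>' correction flags, applying them at each top-level '('.
import Mathlib
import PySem

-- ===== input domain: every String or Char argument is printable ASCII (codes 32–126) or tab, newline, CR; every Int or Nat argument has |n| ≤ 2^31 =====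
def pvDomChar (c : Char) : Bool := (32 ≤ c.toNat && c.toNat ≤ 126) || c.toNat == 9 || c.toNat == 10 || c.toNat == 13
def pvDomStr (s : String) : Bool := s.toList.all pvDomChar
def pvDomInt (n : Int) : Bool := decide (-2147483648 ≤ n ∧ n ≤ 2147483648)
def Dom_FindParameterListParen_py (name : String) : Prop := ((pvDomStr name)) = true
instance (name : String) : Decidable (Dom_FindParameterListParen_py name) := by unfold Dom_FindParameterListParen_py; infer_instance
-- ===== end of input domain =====

-- B replaces A's repeated find()/count() segment passes by a single left-to-right
-- character scan with running balance counters (objective: alternative traversal).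

-- ===== PORT A =====

-- port of A (_FindParameterListParen): the while-loop over start_idx, written as
-- structural recursion on a fuel bound (the loop advances start_idx every iteration,
-- so len(name)+21-start_idx bounds the remaining iterations and the wrapper's fuel is
-- provably sufficient: fuel 0 is reached only with start_idx > len(name), where the
-- loop's find returns -1 anyway).  name.count(c, start, idx) is ported as List.count
-- of the slice (exact for 1-char needles) and name[i] via pyGet? (the .getD defaults
-- are unreachable there: those indices are always in range when reached).
def pvAuxA (cs : List Char) : Nat → Nat → Int → Int → Int
  | 0, _, _, _ => -1
  | fuel + 1, start, tb, pb =>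
    let f := PySem.Chars.findFrom cs ['('] (start : Int) none
    if f = -1 then -1
    else
      let idx : Nat := f.toNat
      let seg := PySem.List.slice cs (some (start : Int)) (some (idx : Int))
      let tb1 := tb + (seg.count '<' : Int) - (seg.count '>' : Int)
      let oiL := PySem.Chars.findFrom cs "operator<".toList (start : Int) (some (idx : Int))
      let tb2 :=
        if oiL ≠ -1 then
          if (PySem.List.pyGet? cs (oiL + 9)).getD ' ' = '<' then tb1 - 2 else tb1 - 1
        else
          let oiG := PySem.Chars.findFrom cs "operator>".toList (start : Int) (some (idx : Int))
          if oiG ≠ -1 then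
            if (PySem.List.pyGet? cs (oiG + 9)).getD ' ' = '>' then tb1 + 2 else tb1 + 1
          else tb1
      let pb1 := pb + (seg.count '(' : Int) - (seg.count ')' : Int)
      if tb2 = 0 ∧ pb1 = 0 then
        if PySem.Chars.findFrom cs "(anonymous namespace)".toList (idx : Int) (some ((idx : Int) + 21)) ≠ -1 then
          pvAuxA cs fuel (idx + 21) tb2 pb1
        else if (PySem.List.pyGet? cs ((idx : Int) - 1)).getD ' ' ≠ ' ' then (idx : Int)
        else pvAuxA cs fuel (idx + 1) tb2 (pb1 + 1)
      else pvAuxA cs fuel (idx + 1) tb2 (pb1 + 1)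

def FindParameterListParen_py (name : String) : Int :=
  pvAuxA name.toList (name.toList.length + 21) 0 0 0

-- ===== PORT B =====

-- port of B: one scan over positions i with running template/paren balances and
-- the per-segment operator-token corrections, as structural recursion on a fuel
-- bound (i advances every step, so len(name)-i bounds the remaining steps and the
-- wrapper's fuel is provably sufficient: fuel 0 is reached only with i >= len(name),
-- where the scan stops with -1 anyway); name[i:i+k] ported as (drop i).take k
-- (exact: i >= 0), name[i-1] via pyGet? (in range whenever reached: the list has a
-- '(' at i, so it is nonempty and Python's -1 wraps to the last element).
def pvScanB (cs : List Char) : Nat → Nat → Int → Int → Option Int → Option Int → Int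
  | 0, _, _, _, _, _ => -1
  | fuel + 1, i, tb, pb, ltc, gtc =>
    if h : i < cs.length then
      let c := cs[i]
      if c = '(' then
        let tb' := tb + ltc.getD (gtc.getD 0)
        if tb' = 0 ∧ pb = 0 then
          if (cs.drop i).take 21 = "(anonymous namespace)".toList then
            pvScanB cs fuel (i + 21) tb' pb none none
          else if (PySem.List.pyGet? cs ((i : Int) - 1)).getD ' ' ≠ ' ' then (i : Int)
          else pvScanB cs fuel (i + 1) tb' (pb + 1) none none
        else pvScanB cs fuel (i + 1) tb' (pb + 1) none none
      else
        let tb' := if c = '<' then tb + 1 else if c = '>' then tb - 1 else tb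
        let pb' := if c = ')' then pb - 1 else pb
        let ltc' := if ltc = none ∧ (cs.drop i).take 9 = "operator<".toList then
            some (if (cs.drop (i + 9)).take 1 = ['<'] then -2 else -1) else ltc
        let gtc' := if gtc = none ∧ (cs.drop i).take 9 = "operator>".toList then
            some (if (cs.drop (i + 9)).take 1 = ['>'] then 2 else 1) else gtc
        pvScanB cs fuel (i + 1) tb' pb' ltc' gtc'
    else -1

def FindParameterListParen_py_alt (name : String) : Int :=
  pvScanB name.toList name.toList.length 0 0 0 none none

-- ===== PRECONDITION & SPEC =====
def Spec_FindParameterListParen_py (name : String) (out : Int) : Prop := out = FindParameterListParen_py_alt name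
instance (name : String) (out : Int) : Decidable (Spec_FindParameterListParen_py name out) := by unfold Spec_FindParameterListParen_py; infer_instance

-- ===== CLAIM (what is proved, stated in full; the proofs are below) =====
def Claim_equal_FindParameterListParen_py : Prop := ∀ (name : String), Dom_FindParameterListParen_py name → Spec_FindParameterListParen_py name (FindParameterListParen_py name)

-- ===== LEMMAS AND PROOFS =====

-- a successful name.find(sub, start) returns an index ≥ start, and can only
-- succeed when start ≤ len(name)
theorem pvFindFrom_bounds (cs sub : List Char) (s : Nat)
    (h : PySem.Chars.findFrom cs sub (s : Int) none ≠ -1) :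
    (s : Int) ≤ PySem.Chars.findFrom cs sub (s : Int) none ∧ s ≤ cs.length := by
  unfold PySem.Chars.findFrom at *
  have h0 : ¬ ((s : Int) < 0) := by omega
  simp only [h0, if_false] at h ⊢
  have hr1 := PySem.Chars.neg_one_le_find
    (List.drop (↑s : Int).toNat (List.take (↑cs.length : Int).toNat cs)) sub
  split_ifs at h ⊢ <;> first | exact absurd rfl h | exact ⟨by omega, by omega⟩

theorem pv_find_step (c : Char) (l tok : List Char) (_htok : tok ≠ []) :
    PySem.Chars.find (c :: l) tok =
      (if tok <+: (c :: l) then 0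
       else if PySem.Chars.find l tok = -1 then -1 else PySem.Chars.find l tok + 1) := by
  by_cases hp : tok <+: (c :: l)
  · rw [if_pos hp]
    have h0 : 0 ≤ PySem.Chars.find (c :: l) tok :=
      (PySem.Chars.find_nonneg_iff _ _).2 hp.isInfix
    obtain ⟨hpre, hmin⟩ := PySem.Chars.find_spec h0
    by_contra hne
    have hm : 0 < (PySem.Chars.find (c :: l) tok).toNat := by omega
    exact (hmin 0 hm) (by simpa using hp)
  · rw [if_neg hp]
    by_cases hl : PySem.Chars.find l tok = -1
    · rw [if_pos hl]
      rw [PySem.Chars.find_eq_neg_one_iff] at hl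
      rw [PySem.Chars.find_eq_neg_one_iff]
      intro hinf
      rcases List.infix_cons_iff.1 hinf with h | h
      · exact hp h
      · exact hl h
    · rw [if_neg hl]
      have h0l : 0 ≤ PySem.Chars.find l tok := by
        have := PySem.Chars.neg_one_le_find l tok; omega
      obtain ⟨hpre_l, hmin_l⟩ := PySem.Chars.find_spec h0l
      have hinf : tok <:+: (c :: l) :=
        List.infix_cons ((hpre_l.isInfix).trans (List.drop_suffix _ _).isInfix)
      have h0 : 0 ≤ PySem.Chars.find (c :: l) tok :=
        (PySem.Chars.find_nonneg_iff _ _).2 hinf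
      obtain ⟨hpre, hmin⟩ := PySem.Chars.find_spec h0
      set m := (PySem.Chars.find (c :: l) tok).toNat with hmdef
      set k := (PySem.Chars.find l tok).toNat with hkdef
      have hm0 : m ≠ 0 := by
        intro h; apply hp; simpa [h] using hpre
      have h1 : tok <+: l.drop (m - 1) := by
        have h2 : (c :: l).drop m = l.drop (m - 1) := by
          conv_lhs => rw [show m = (m - 1) + 1 from by omega]
          rw [List.drop_succ_cons]
        rwa [h2] at hpre
      have hk_le : k ≤ m - 1 := by
        by_contra hlt
        exact (hmin_l (m - 1) (by omega)) h1
      have hle_k : m - 1 ≤ k := by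
        by_contra hlt
        have h4 : ¬ tok <+: (c :: l).drop (k + 1) := hmin (k + 1) (by omega)
        rw [List.drop_succ_cons] at h4
        exact h4 hpre_l
      omega

def pvFstCorr (cs tok : List Char) (two : Char) (v2 v1 : Int) : Nat → Nat → Option Int
  | _, 0 => none
  | i, d + 1 =>
    if tok <+: cs.drop i then some (if cs[i + 9]? = some two then v2 else v1)
    else pvFstCorr cs tok two v2 v1 (i + 1) d

theorem pv_take_one_iff (cs : List Char) (k : Nat) (c : Char) :
    ((cs.drop k).take 1 = [c]) ↔ cs[k]? = some c := by
  rw [List.take_one, List.head?_drop]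
  cases cs[k]? <;> simp

theorem pv_singleton_prefix_iff (cs : List Char) (k : Nat) (c : Char) :
    ([c] <+: cs.drop k) ↔ cs[k]? = some c := by
  rw [List.prefix_iff_eq_take]
  simp only [List.length_singleton]
  rw [eq_comm, pv_take_one_iff]

theorem pv_seg_cons (cs : List Char) (s idx : Nat) (hs : s < idx) (hlen : s < cs.length) :
    (cs.drop s).take (idx - s) = cs[s] :: (cs.drop (s + 1)).take (idx - (s + 1)) := by
  rw [List.drop_eq_getElem_cons hlen]
  conv_lhs => rw [show idx - s = (idx - (s + 1)) + 1 from by omega]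
  rw [List.take_succ_cons]

theorem pv_findFrom_window (cs sub : List Char) (s e : Nat) (hse : s ≤ e) (he : e ≤ cs.length) :
    PySem.Chars.findFrom cs sub (s : Int) (some (e : Int)) =
      (if PySem.Chars.find ((cs.drop s).take (e - s)) sub = -1 then -1
       else (s : Int) + PySem.Chars.find ((cs.drop s).take (e - s)) sub) := by
  unfold PySem.Chars.findFrom
  have h1 : ¬ ((cs.length : Int) < (e : Int)) := by omega
  have h2 : ¬ ((e : Int) < 0) := by omega
  have h3 : ¬ ((s : Int) < 0) := by omega
  have h4 : ¬ ((e : Int) < (s : Int)) := by omega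
  simp only [h1, h2, h3, h4, if_false]
  have h5 : ((e : Int)).toNat = e := by omega
  have h6 : ((s : Int)).toNat = s := by omega
  rw [h5, h6, List.drop_take]

theorem pv_corr_eq (cs tok : List Char) (two : Char) (v2 v1 : Int) (idx : Nat)
    (htok9 : tok.length = 9) (hnp : '(' ∉ tok) (hidx : cs[idx]? = some '(') :
    ∀ d s, s + d = idx → (∀ j, s ≤ j → j < idx → cs[j]? ≠ some '(') →
    (if PySem.Chars.findFrom cs tok (s : Int) (some (idx : Int)) = -1 then none
     else some (if (PySem.List.pyGet? cs
        (PySem.Chars.findFrom cs tok (s : Int) (some (idx : Int)) + 9)).getD ' ' = two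
       then v2 else v1))
    = pvFstCorr cs tok two v2 v1 s d := by
  have htok : tok ≠ [] := by intro h; rw [h] at htok9; simp at htok9
  have hlen : idx < cs.length := by
    rcases List.getElem?_eq_some_iff.1 hidx with ⟨h, _⟩; exact h
  intro d
  induction d with
  | zero =>
    intro s hs _
    subst hs
    simp only [Nat.add_zero] at *
    simp only [pv_findFrom_window cs tok s s (le_refl s) (by omega), Nat.sub_self,
      List.take_zero]
    have hnil : PySem.Chars.find [] tok = -1 := by
      rw [PySem.Chars.find_eq_neg_one_iff]
      intro h; exact htok (List.infix_nil.1 h)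
    simp [hnil, pvFstCorr]
  | succ d ih =>
    intro s hs hnop
    have hsidx : s < idx := by omega
    have hslen : s < cs.length := by omega
    rw [pv_findFrom_window cs tok s idx (by omega) (by omega)]
    rw [pv_seg_cons cs s idx hsidx hslen]
    rw [pv_find_step _ _ _ htok]
    by_cases hw : tok <+: cs[s] :: (cs.drop (s + 1)).take (idx - (s + 1))
    · -- token found at s
      rw [if_pos hw]
      have hwin : tok <+: cs.drop s := by
        have h1 : cs[s] :: (cs.drop (s + 1)).take (idx - (s + 1)) = (cs.drop s).take (idx - s) :=
          (pv_seg_cons cs s idx hsidx hslen).symm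
        rw [h1] at hw
        exact hw.trans (List.take_prefix _ _)
      have h9 : s + 9 ≤ idx := by
        have h2 := hw.length_le
        simp only [List.length_cons, List.length_take, List.length_drop, htok9] at h2
        omega
      have hrange : s + 9 < cs.length := by omega
      have hfst : pvFstCorr cs tok two v2 v1 s (d + 1)
          = some (if cs[s + 9]? = some two then v2 else v1) := by
        rw [pvFstCorr, if_pos hwin]
      rw [hfst]
      rw [show (if (0 : Int) = -1 then (-1 : Int) else (s : Int) + 0) = ((s : Int)) from by norm_num]
      rw [if_neg (show ¬ ((s : Int) = -1) from by omega)]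
      rw [show (s : Int) + 9 = ((s + 9 : Nat) : Int) from by push_cast; ring]
      rw [PySem.List.pyGet?_natCast]
      rw [List.getElem?_eq_getElem hrange]
      simp only [Option.getD_some, Option.some.injEq]
      rfl
    · -- no token at s: step to s + 1
      rw [if_neg hw]
      have hnotok : ¬ tok <+: cs.drop s := by
        intro hq
        by_cases h9 : s + 9 ≤ idx
        · apply hw
          have h1 : cs[s] :: (cs.drop (s + 1)).take (idx - (s + 1)) = (cs.drop s).take (idx - s) :=
            (pv_seg_cons cs s idx hsidx hslen).symm
          rw [h1]
          rw [List.prefix_take_iff]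
          exact ⟨hq, by omega⟩
        · apply hnp
          have hq' : tok = (cs.drop s).take tok.length := List.prefix_iff_eq_take.1 hq
          have hidx' : (cs.drop s)[idx - s]? = some '(' := by
            rw [List.getElem?_drop]
            rw [show s + (idx - s) = idx from by omega]
            exact hidx
          have hmem : tok[idx - s]? = some '(' := by
            rw [hq']
            rw [List.getElem?_take, if_pos (by omega)]
            exact hidx'
          exact List.mem_of_getElem? hmem
      have hfst : pvFstCorr cs tok two v2 v1 s (d + 1) = pvFstCorr cs tok two v2 v1 (s + 1) d := by
        rw [pvFstCorr, if_neg hnotok]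
      rw [hfst]
      rw [← ih (s + 1) (by omega) (fun j hj hj' => hnop j (by omega) hj')]
      rw [pv_findFrom_window cs tok (s + 1) idx (by omega) (by omega)]
      set r := PySem.Chars.find ((cs.drop (s + 1)).take (idx - (s + 1))) tok with hr
      by_cases hrn : r = -1
      · simp [hrn]
      · have hr0 : (0 : Int) ≤ r := by
          have := PySem.Chars.neg_one_le_find ((cs.drop (s + 1)).take (idx - (s + 1))) tok
          omega
        rw [if_neg hrn, if_neg hrn]
        rw [if_neg (show ¬ ((r + 1 : Int) = -1) from by omega)]
        rw [show (s : Int) + (r + 1) = ((s + 1 : Nat) : Int) + r from by push_cast; ring]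

theorem pv_anon_iff (cs : List Char) (idx : Nat) (hlen : idx < cs.length) :
    (PySem.Chars.findFrom cs "(anonymous namespace)".toList (idx : Int)
        (some ((idx : Int) + 21)) ≠ -1)
      ↔ (cs.drop idx).take 21 = "(anonymous namespace)".toList := by
  have hanlen : ("(anonymous namespace)".toList).length = 21 := by decide
  -- reduce findFrom to find on the 21-char window
  have hwin : PySem.Chars.findFrom cs "(anonymous namespace)".toList (idx : Int)
      (some ((idx : Int) + 21)) =
      (if PySem.Chars.find ((cs.drop idx).take 21) "(anonymous namespace)".toList = -1 then -1
       else (idx : Int) + PySem.Chars.find ((cs.drop idx).take 21) "(anonymous namespace)".toList) := by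
    unfold PySem.Chars.findFrom
    have h3 : ¬ (((idx : Int)) < 0) := by omega
    by_cases hbig : (cs.length : Int) < (idx : Int) + 21
    · have h4 : ¬ ((cs.length : Int) < (idx : Int)) := by omega
      have h5 : ((cs.length : Int)).toNat = cs.length := by omega
      have h6 : (((idx : Int))).toNat = idx := by omega
      simp only [hbig, if_true, h3, if_false, h4, h5, h6, List.take_length]
      rw [show cs.drop idx = (cs.drop idx).take 21 from
        (List.take_of_length_le (by simp; omega)).symm]
      simp [List.take_take]
    · have h2 : ¬ (((idx : Int) + 21) < 0) := by omega
      have h4 : ¬ ((idx : Int) + 21 < (idx : Int)) := by omega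
      have h5 : ((idx : Int) + 21).toNat = idx + 21 := by omega
      have h6 : (((idx : Int))).toNat = idx := by omega
      simp only [hbig, if_false, h2, h3, h4, h5, h6]
      rw [List.drop_take, show idx + 21 - idx = 21 from by omega]
  rw [hwin]
  have hlentake : ((cs.drop idx).take 21).length ≤ 21 := by
    simp [List.length_take]
  constructor
  · intro h
    have hf : PySem.Chars.find ((cs.drop idx).take 21) "(anonymous namespace)".toList ≠ -1 := by
      intro hc; rw [hc] at h; simp at h
    rw [ne_eq, PySem.Chars.find_eq_neg_one_iff, not_not] at hf
    have hle := hf.length_le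
    exact (hf.eq_of_length (by omega)).symm
  · intro h
    have hinf : "(anonymous namespace)".toList <:+: (cs.drop idx).take 21 := by
      rw [h]
    have h0 : 0 ≤ PySem.Chars.find ((cs.drop idx).take 21) "(anonymous namespace)".toList :=
      (PySem.Chars.find_nonneg_iff _ _).2 hinf
    split_ifs with hc
    · omega
    · intro hx; omega

theorem pv_noparen_count (cs : List Char) (idx : Nat) (hlen : idx ≤ cs.length) :
    ∀ d s, s + d = idx → (∀ j, s ≤ j → j < idx → cs[j]? ≠ some '(') →
    ((cs.drop s).take (idx - s)).count '(' = 0 := by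
  intro d
  induction d with
  | zero => intro s hs _; subst hs; simp
  | succ d ih =>
    intro s hs hnop
    have hsidx : s < idx := by omega
    have hslen : s < cs.length := by omega
    rw [pv_seg_cons cs s idx hsidx hslen, List.count_cons]
    have hc : cs[s] ≠ '(' := by
      intro h
      exact hnop s (le_refl s) hsidx (by rw [List.getElem?_eq_getElem hslen, h])
    rw [ih (s + 1) (by omega) (fun j hj hj' => hnop j (by omega) hj')]
    simp [hc]

theorem pv_flag_step (cs tok : List Char) (two : Char) (v2 v1 : Int) (s d : Nat)
    (htok9 : tok.length = 9) (o : Option Int) :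
    o.or (pvFstCorr cs tok two v2 v1 s (d + 1)) =
      (if o = none ∧ (cs.drop s).take 9 = tok then
        some (if (cs.drop (s + 9)).take 1 = [two] then v2 else v1) else o).or
        (pvFstCorr cs tok two v2 v1 (s + 1) d) := by
  rcases o with _ | v
  · simp only [Option.none_or, true_and]
    rw [pvFstCorr]
    by_cases htk : tok <+: cs.drop s
    · rw [if_pos htk]
      have hcond : (cs.drop s).take 9 = tok := by
        have := List.prefix_iff_eq_take.1 htk
        rw [htok9] at this
        exact this.symm
      rw [if_pos hcond]
      rw [Option.some_or]
      congr 1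
      by_cases hc : cs[s + 9]? = some two
      · rw [if_pos hc, if_pos ((pv_take_one_iff cs (s + 9) two).2 hc)]
      · rw [if_neg hc, if_neg (fun h => hc ((pv_take_one_iff cs (s + 9) two).1 h))]
    · rw [if_neg htk]
      have hcond : ¬ ((cs.drop s).take 9 = tok) := by
        intro h
        exact htk (by rw [List.prefix_iff_eq_take, htok9, h])
      rw [if_neg hcond, Option.none_or]
  · simp only [Option.some_or, reduceCtorEq, false_and, if_false]

theorem pv_scan_seg (cs : List Char) (idx : Nat) (hlen : idx < cs.length)
    (hidx : cs[idx]? = some '(') :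
    ∀ d s tb pb ltc gtc fuel, s + d = idx → (∀ j, s ≤ j → j < idx → cs[j]? ≠ some '(') →
    pvScanB cs (fuel + d) s tb pb ltc gtc =
      pvScanB cs fuel idx
        (tb + (((cs.drop s).take (idx - s)).count '<' : Int)
            - (((cs.drop s).take (idx - s)).count '>' : Int))
        (pb - (((cs.drop s).take (idx - s)).count ')' : Int))
        (ltc.or (pvFstCorr cs "operator<".toList '<' (-2) (-1) s d))
        (gtc.or (pvFstCorr cs "operator>".toList '>' 2 1 s d)) := by
  intro d
  induction d with
  | zero =>
    intro s tb pb ltc gtc fuel hs _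
    subst hs
    simp [pvFstCorr]
  | succ d ih =>
    intro s tb pb ltc gtc fuel hs hnop
    have hsidx : s < idx := by omega
    have hslen : s < cs.length := by omega
    have hc : cs[s] ≠ '(' := by
      intro h
      exact hnop s (le_refl s) hsidx (by rw [List.getElem?_eq_getElem hslen, h])
    rw [show fuel + (d + 1) = (fuel + d) + 1 from by omega]
    rw [pvScanB.eq_2]
    simp only [dif_pos hslen, if_neg hc]
    rw [ih (s + 1) _ _ _ _ fuel (by omega) (fun j hj hj' => hnop j (by omega) hj')]
    have hseg := pv_seg_cons cs s idx hsidx hslen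
    rw [hseg, List.count_cons, List.count_cons, List.count_cons]
    rw [← pv_flag_step cs "operator<".toList '<' (-2) (-1) s d (by decide) ltc]
    rw [← pv_flag_step cs "operator>".toList '>' 2 1 s d (by decide) gtc]
    have e1 : (if cs[s] = '<' then tb + 1 else if cs[s] = '>' then tb - 1 else tb)
          + (((cs.drop (s + 1)).take (idx - (s + 1))).count '<' : Int)
          - (((cs.drop (s + 1)).take (idx - (s + 1))).count '>' : Int)
        = tb + ((((cs.drop (s + 1)).take (idx - (s + 1))).count '<' + if cs[s] == '<' then 1 else 0 : Nat) : Int)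
            - ((((cs.drop (s + 1)).take (idx - (s + 1))).count '>' + if cs[s] == '>' then 1 else 0 : Nat) : Int) := by
      by_cases h1 : cs[s] = '<' <;> by_cases h2 : cs[s] = '>' <;>
        simp [h1, h2] <;> push_cast <;> omega
    have e2 : (if cs[s] = ')' then pb - 1 else pb)
          - (((cs.drop (s + 1)).take (idx - (s + 1))).count ')' : Int)
        = pb - ((((cs.drop (s + 1)).take (idx - (s + 1))).count ')' + if cs[s] == ')' then 1 else 0 : Nat) : Int) := by
      by_cases h1 : cs[s] = ')' <;> simp [h1] <;> push_cast <;> omega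
    rw [e1, e2]

theorem pv_scan_stop (cs : List Char) (fuel i : Nat) (tb pb : Int) (ltc gtc : Option Int)
    (hi : cs.length ≤ i) : pvScanB cs fuel i tb pb ltc gtc = -1 := by
  cases fuel with
  | zero => rfl
  | succ fuel => rw [pvScanB.eq_2, dif_neg (by omega)]

theorem pv_scan_noparen (cs : List Char) :
    ∀ fuel i tb pb ltc gtc, (∀ j, i ≤ j → cs[j]? ≠ some '(') →
    pvScanB cs fuel i tb pb ltc gtc = -1 := by
  intro fuel
  induction fuel with
  | zero => intro i tb pb ltc gtc _; rfl
  | succ fuel ih =>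
    intro i tb pb ltc gtc hnop
    by_cases hi : i < cs.length
    · have hc : cs[i] ≠ '(' := by
        intro h
        exact hnop i (le_refl i) (by rw [List.getElem?_eq_getElem hi, h])
      rw [pvScanB.eq_2]
      simp only [dif_pos hi, if_neg hc]
      exact ih (i + 1) _ _ _ _ (fun j hj => hnop j (by omega))
    · rw [pvScanB.eq_2, dif_neg hi]

theorem pv_main (cs : List Char) :
    ∀ fa start tb pb fb, cs.length + 21 - start ≤ fa → cs.length - start ≤ fb →
    pvAuxA cs fa start tb pb = pvScanB cs fb start tb pb none none := by
  intro fa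
  induction fa with
  | zero =>
    intro start tb pb fb hfa hfb
    exact (pv_scan_stop cs fb start tb pb none none (by omega)).symm
  | succ fa ihn =>
    intro start tb pb fb hfa hfb
    by_cases hf : PySem.Chars.findFrom cs ['('] (start : Int) none = -1
    · rw [pvAuxA.eq_2]
      simp only [hf, reduceIte]
      have hnop : ∀ j, start ≤ j → cs[j]? ≠ some '(' := by
        intro j hj hjp
        by_cases hsl : start ≤ cs.length
        · rw [PySem.Chars.findFrom_natCast_eq_neg_one_iff cs ['('] start hsl] at hf
          apply hf
          have : (cs.drop start)[j - start]? = some '(' := by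
            rw [List.getElem?_drop, show start + (j - start) = j from by omega]
            exact hjp
          obtain ⟨l1, l2, hsp⟩ := List.append_of_mem (List.mem_of_getElem? this)
          exact ⟨l1, l2, by simp [hsp]⟩
        · have : j < cs.length := (List.getElem?_eq_some_iff.1 hjp).1
          omega
      exact (pv_scan_noparen cs fb start tb pb none none (fun j hj => hnop j hj)).symm
    · obtain ⟨hge, hle⟩ := pvFindFrom_bounds cs ['('] start hf
      obtain ⟨hge', hpre, hmin⟩ := PySem.Chars.findFrom_natCast_spec cs ['('] start hle hf
      have hidx? : cs[(PySem.Chars.findFrom cs ['('] (start : Int) none).toNat]? = some '(' :=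
        (pv_singleton_prefix_iff _ _ _).1 hpre
      have hidxlen : (PySem.Chars.findFrom cs ['('] (start : Int) none).toNat < cs.length :=
        (List.getElem?_eq_some_iff.1 hidx?).1
      have hnop : ∀ j, start ≤ j → j < (PySem.Chars.findFrom cs ['('] (start : Int) none).toNat →
          cs[j]? ≠ some '(' :=
        fun j h1 h2 hj => hmin j h1 h2 ((pv_singleton_prefix_iff _ _ _).2 hj)
      set idx := (PySem.Chars.findFrom cs ['('] (start : Int) none).toNat with hidxdef
      have hsi : start ≤ idx := by omega
      -- B: cross the segment with fuel bookkeeping, then take the '(' step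
      rw [show fb = ((fb - (idx - start) - 1) + 1) + (idx - start) from by omega]
      rw [pv_scan_seg cs idx hidxlen hidx? (idx - start) start tb pb none none
        ((fb - (idx - start) - 1) + 1) (by omega) hnop]
      rw [pvScanB.eq_2]
      have hgv : cs[idx]'hidxlen = '(' := by
        rcases List.getElem?_eq_some_iff.1 hidx? with ⟨h, hv⟩; exact hv
      simp only [dif_pos hidxlen, if_pos hgv, Option.none_or]
      -- A: unfold one iteration
      rw [pvAuxA.eq_2]
      simp only [if_neg hf, PySem.List.slice_natCast]
      rw [← hidxdef]
      -- corrections agree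
      have hcorrL := pv_corr_eq cs "operator<".toList '<' (-2) (-1) idx (by decide) (by decide)
        hidx? (idx - start) start (by omega) hnop
      have hcorrG := pv_corr_eq cs "operator>".toList '>' 2 1 idx (by decide) (by decide)
        hidx? (idx - start) start (by omega) hnop
      -- the '(' count over the paren-free segment is 0
      have hcnt0 := pv_noparen_count cs idx (by omega) (idx - start) start (by omega) hnop
      simp only [pv_anon_iff cs idx hidxlen, hcnt0]
      rw [ihn (idx + 21) _ _ (fb - (idx - start) - 1) (by omega) (by omega),
        ihn (idx + 1) _ _ (fb - (idx - start) - 1) (by omega) (by omega)]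
      rw [← hcorrL, ← hcorrG]
      simp only [Nat.cast_zero, add_zero]
      by_cases hL : PySem.Chars.findFrom cs "operator<".toList (↑start : Int) (some (↑idx : Int)) = -1
      · simp only [hL, ne_eq, not_true_eq_false, if_false, reduceIte, Option.getD_none]
        by_cases hG : PySem.Chars.findFrom cs "operator>".toList (↑start : Int) (some (↑idx : Int)) = -1
        · simp only [hG, not_true_eq_false, reduceIte, Option.getD_none, add_zero]
        · simp only [hG, not_false_eq_true, reduceIte, Option.getD_some]
          by_cases hgd : (PySem.List.pyGet? cs
              (PySem.Chars.findFrom cs "operator>".toList (↑start : Int) (some (↑idx : Int)) + 9)).getD ' ' = '>'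
          · simp only [hgd, reduceIte]
          · simp only [hgd, reduceIte]
      · simp only [hL, ne_eq, not_false_eq_true, reduceIte, Option.getD_some]
        by_cases hgd : (PySem.List.pyGet? cs
            (PySem.Chars.findFrom cs "operator<".toList (↑start : Int) (some (↑idx : Int)) + 9)).getD ' ' = '<'
        · simp only [hgd, reduceIte, ← sub_eq_add_neg]
        · simp only [hgd, reduceIte, ← sub_eq_add_neg]

-- ===== VERDICT (by name: the statement is the Claim_ definition above) =====
theorem FindParameterListParen_py_spec : Claim_equal_FindParameterListParen_py := by
  intro name _
  unfold Spec_FindParameterListParen_py FindParameterListParen_py FindParameterListParen_py_alt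
  exact pv_main name.toList (name.toList.length + 21) 0 0 0 name.toList.length (by omega) (by omega)
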